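-- pv_equiv track=rewrite | github.com/pypi-data/pypi-mirror-60 | packages/sufarray-kkto/sufarray_kkto-0.1.1-py3-none-any.whl/sufarray/__init__.py | _make_names
-- ===== SOURCE A (Python) =====
-- import typing
--
-- NameListType = typing.List[int]
--
-- def _make_names(items: typing.Union[str, typing.List[typing.Any]],
--                 sorted_arr: NameListType) -> NameListType:
--     ret = [-1] * len(items)
--     name = -1
--     last = None  # type: typing.Any
--     for pos in range(0, len(items)):
--         if items[sorted_arr[pos]] != last:  # Check for name update
--             name = pos
--             last = items[sorted_arr[pos]]
--         ret[sorted_arr[pos]] = name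
--     return ret
-- ===== SOURCE B (Python) =====
-- import typing
--
-- NameListType = typing.List[int]
--
-- def _make_names(items: typing.Union[str, typing.List[typing.Any]],
--                 sorted_arr: NameListType) -> NameListType:
--     # Different algorithm: materialize the values in sorted order, collect the
--     # positions where a new run of equal values begins ("boundaries"), then for
--     # each sorted position binary-search the latest boundary at or before it —
--     # that boundary is its rank name.
--     n = len(items)
--     vals = [items[i] for i in sorted_arr[:n]]
--     bounds = [p for p in range(n) if p == 0 or vals[p] != vals[p - 1]]
--     ret = [-1] * n
--     for p in range(n):
--         lo, hi = 0, len(bounds)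
--         while lo < hi:
--             mid = (lo + hi) // 2
--             if bounds[mid] <= p:
--                 lo = mid + 1
--             else:
--                 hi = mid
--         ret[sorted_arr[p]] = bounds[lo - 1]
--     return ret
-- ===== Notes on version B (the rewrite author's own statement) =====
-- stated objective: alternative
-- what changed: Replaces A's single stateful sweep (name/last sentinel) with a boundary-index algorithm: it precomputes the list of run-start positions in sorted order and assigns each position's name by binary-searching the latest boundary at or before it.
import Mathlib
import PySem

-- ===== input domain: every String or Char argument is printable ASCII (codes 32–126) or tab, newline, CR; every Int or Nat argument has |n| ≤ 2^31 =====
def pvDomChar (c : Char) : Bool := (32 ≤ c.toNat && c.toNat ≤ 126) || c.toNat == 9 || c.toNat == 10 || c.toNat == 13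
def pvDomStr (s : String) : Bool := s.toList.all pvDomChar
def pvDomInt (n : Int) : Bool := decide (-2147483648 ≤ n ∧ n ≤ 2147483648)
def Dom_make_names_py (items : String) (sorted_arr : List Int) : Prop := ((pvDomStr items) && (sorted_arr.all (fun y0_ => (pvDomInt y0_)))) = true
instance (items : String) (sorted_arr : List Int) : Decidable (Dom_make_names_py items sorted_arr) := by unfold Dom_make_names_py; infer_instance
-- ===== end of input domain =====

-- B replaces A's single stateful sweep (name/last sentinel) with a different algorithm:
-- collect the run-start positions ("bounds") in sorted order, then binary-search the
-- latest boundary at or before each position to obtain its name (alternative, not faster).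


-- ===== PORT A =====
-- loop body of A's single for-loop: state is (ret, name, last)
def aStep (items : String) (sorted_arr : List Int)
    (s : List Int × Int × Option Char) (pos : Int) : List Int × Int × Option Char :=
  let c := PySem.Str.pyGet? items (PySem.List.pyGetD sorted_arr pos 0)
  let name := if c ≠ s.2.2 then pos else s.2.1
  let last := if c ≠ s.2.2 then c else s.2.2
  (PySem.List.pySetD s.1 (PySem.List.pyGetD sorted_arr pos 0) name, name, last)

def make_names_py (items : String) (sorted_arr : List Int) : List Int :=
  ((PySem.List.pyRange 0 (PySem.Str.len items) 1).foldl (aStep items sorted_arr)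
    (List.replicate items.toList.length (-1 : Int), (-1 : Int), (none : Option Char))).1

-- ===== PORT B =====
-- B's inner while loop: lo, hi are Python ints that stay ≥ 0, ported as Nat ((lo+hi)//2 = Nat
-- division); the extra fuel argument is only a structural totality guard (the loop shrinks
-- hi - lo by at least 1 per step, so fuel = hi - lo never runs out)
def bsr (bounds : List Int) (p : Int) : Nat → Nat → Nat → Nat
  | 0, lo, _ => lo
  | fuel + 1, lo, hi =>
    if lo < hi then
      if PySem.List.pyGetD bounds (((lo + hi) / 2 : Nat) : Int) 0 ≤ p then
        bsr bounds p fuel ((lo + hi) / 2 + 1) hi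
      else
        bsr bounds p fuel lo ((lo + hi) / 2)
    else lo

def make_names_py_alt (items : String) (sorted_arr : List Int) : List Int :=
  let n := PySem.Str.len items
  let vals := (PySem.List.slice sorted_arr none (some n)).map
    (fun i => PySem.Str.pyGet? items i)
  let bounds := (PySem.List.pyRange 0 n 1).filter
    (fun p => p == 0 || !(PySem.List.pyGetD vals p none == PySem.List.pyGetD vals (p - 1) none))
  (PySem.List.pyRange 0 n 1).foldl
    (fun r p => PySem.List.pySetD r (PySem.List.pyGetD sorted_arr p 0)
      (PySem.List.pyGetD bounds ((bsr bounds p bounds.length 0 bounds.length - 1 : Nat) : Int) 0))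
    (List.replicate n.toNat (-1 : Int))

-- ===== PRECONDITION & SPEC =====
-- Pre_ holds exactly where A returns: every pos < len(items) must be a valid index into
-- sorted_arr and sorted_arr[pos] a valid (possibly negative) index into items.
def Pre_make_names_py (items : String) (sorted_arr : List Int) : Prop :=
  items.toList.length ≤ sorted_arr.length ∧
  ∀ p ∈ sorted_arr.take items.toList.length, PySem.Raise.InRange items.toList.length p
instance (items : String) (sorted_arr : List Int) : Decidable (Pre_make_names_py items sorted_arr) := by
  unfold Pre_make_names_py; infer_instance

def pvWitness_make_names_py : String × List Int := ("banana", [1, 3, 5, 0, 2, 4])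

def Spec_make_names_py (items : String) (sorted_arr : List Int) (out : List Int) : Prop := out = make_names_py_alt items sorted_arr
instance (items : String) (sorted_arr : List Int) (out : List Int) : Decidable (Spec_make_names_py items sorted_arr out) := by unfold Spec_make_names_py; infer_instance

-- ===== CLAIM (what is proved, stated in full; the proofs are below) =====
def Claim_equal_make_names_py : Prop := ∀ (items : String) (sorted_arr : List Int), Dom_make_names_py items sorted_arr → Pre_make_names_py items sorted_arr → Spec_make_names_py items sorted_arr (make_names_py items sorted_arr)

-- ===== LEMMAS AND PROOFS =====

-- the value at sorted position q (what both programs compare)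
def valAt (items : String) (sorted_arr : List Int) (q : Nat) : Option Char :=
  PySem.Str.pyGet? items (PySem.List.pyGetD sorted_arr (q : Int) 0)

-- the name A assigns at sorted position q (start of the current run)
def nmN (items : String) (sorted_arr : List Int) : Nat → Nat
  | 0 => 0
  | p + 1 => if valAt items sorted_arr (p + 1) = valAt items sorted_arr p
             then nmN items sorted_arr p else p + 1

theorem key_ne_none (items : String) (i : Int)
    (h : PySem.Raise.InRange items.toList.length i) :
    PySem.Str.pyGet? items i ≠ none := by
  intro hn
  simp only [PySem.Str.pyGet?, PySem.Chars.pyGet?] at hn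
  rw [PySem.List.pyGet?_eq_none_iff] at hn
  exact hn h

theorem nmN_le (items : String) (sorted_arr : List Int) (p : Nat) :
    nmN items sorted_arr p ≤ p := by
  induction p with
  | zero => simp [nmN]
  | succ p ih => rw [nmN]; split_ifs <;> omega

theorem nmN_pred (items : String) (sorted_arr : List Int) (p : Nat) :
    nmN items sorted_arr p = 0 ∨
      valAt items sorted_arr (nmN items sorted_arr p) ≠
        valAt items sorted_arr (nmN items sorted_arr p - 1) := by
  induction p with
  | zero => left; simp [nmN]
  | succ p ih =>
    rw [nmN]
    split_ifs with h
    · exact ih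
    · right; simpa using h

theorem nmN_max (items : String) (sorted_arr : List Int) (p q : Nat)
    (hq : q ≤ p)
    (hpred : q = 0 ∨ valAt items sorted_arr q ≠ valAt items sorted_arr (q - 1)) :
    q ≤ nmN items sorted_arr p := by
  induction p with
  | zero => omega
  | succ p ih =>
    rw [nmN]
    rcases Nat.eq_or_lt_of_le hq with rfl | hlt
    · rcases hpred with h0 | hne
      · omega
      · rw [if_neg (by simpa using hne)]
    · have := ih (by omega)
      split_ifs <;> omega

-- ===== A-side: the fold with (name, last) state is a plain scatter of nmN =====
theorem A_scatter (items : String) (sorted_arr : List Int) (n : Nat) (p : Nat)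
    (hp : 1 ≤ p) (ret : List Int) :
    ((PySem.List.pyRange (p : Int) (n : Int) 1).foldl (aStep items sorted_arr)
        (ret, ((nmN items sorted_arr (p - 1) : Nat) : Int), valAt items sorted_arr (p - 1))).1
      = (PySem.List.pyRange (p : Int) (n : Int) 1).foldl
          (fun r q => PySem.List.pySetD r (PySem.List.pyGetD sorted_arr q 0)
            ((nmN items sorted_arr q.toNat : Nat) : Int)) ret := by
  by_cases h : p < n
  · have hcast : ((p : Int) + 1) = ((p + 1 : Nat) : Int) := by push_cast; ring
    rw [PySem.List.pyRange_one_cons (by exact_mod_cast h)]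
    simp only [List.foldl_cons]
    have hval : PySem.Str.pyGet? items (PySem.List.pyGetD sorted_arr (p : Int) 0)
        = valAt items sorted_arr p := rfl
    have hnm : nmN items sorted_arr p
        = if valAt items sorted_arr p = valAt items sorted_arr (p - 1)
          then nmN items sorted_arr (p - 1) else p := by
      obtain ⟨p', rfl⟩ : ∃ p', p = p' + 1 := ⟨p - 1, by omega⟩
      simp [nmN]
    have hstep : aStep items sorted_arr
        (ret, ((nmN items sorted_arr (p - 1) : Nat) : Int), valAt items sorted_arr (p - 1))
        ((p : Int))
        = (PySem.List.pySetD ret (PySem.List.pyGetD sorted_arr (p : Int) 0)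
            ((nmN items sorted_arr p : Nat) : Int),
           ((nmN items sorted_arr p : Nat) : Int), valAt items sorted_arr p) := by
      by_cases he : valAt items sorted_arr p = valAt items sorted_arr (p - 1)
      -- in the equal branch last stays valAt (p-1) = valAt p; in the other it becomes valAt p
      · have hcond : ¬ (valAt items sorted_arr p ≠ valAt items sorted_arr (p - 1)) :=
          fun hne => hne he
        simp only [aStep]
        rw [hval, if_neg hcond, if_neg hcond, hnm, if_pos he, he]
      · simp only [aStep]
        rw [hval, if_pos he, if_pos he, hnm, if_neg he]
    rw [hstep, hcast]
    have := A_scatter items sorted_arr n (p + 1) (by omega)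
      (PySem.List.pySetD ret (PySem.List.pyGetD sorted_arr (p : Int) 0)
        ((nmN items sorted_arr p : Nat) : Int))
    simpa [Nat.add_sub_cancel, ← hcast] using this
  · rw [PySem.List.pyRange_one_eq_nil (by exact_mod_cast Nat.le_of_not_lt h)]
    simp
termination_by n - p

-- ===== B-side: binary-search invariant =====
theorem bsr_inv (bounds : List Int) (q : Int)
    (hmono : ∀ i j : Nat, (hi : i < bounds.length) → (hj : j < bounds.length) → i ≤ j →
      bounds[i] ≤ bounds[j])
    (fuel lo hi : Nat) (hf : hi - lo ≤ fuel) (h1 : lo ≤ hi) (h2 : hi ≤ bounds.length)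
    (hlo : ∀ i : Nat, i < lo → (h : i < bounds.length) → bounds[i] ≤ q)
    (hhi : ∀ i : Nat, hi ≤ i → (h : i < bounds.length) → q < bounds[i]) :
    lo ≤ bsr bounds q fuel lo hi ∧ bsr bounds q fuel lo hi ≤ hi ∧
    (∀ i : Nat, i < bsr bounds q fuel lo hi → (h : i < bounds.length) → bounds[i] ≤ q) ∧
    (∀ i : Nat, bsr bounds q fuel lo hi ≤ i → (h : i < bounds.length) → q < bounds[i]) := by
  induction fuel generalizing lo hi with
  | zero =>
    have hlohi : lo = hi := by omega
    rw [bsr]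
    exact ⟨le_refl lo, h1, fun i hilt h => hlo i hilt h,
      fun i hile h => hhi i (by omega) h⟩
  | succ fuel ih =>
    rw [bsr]
    split_ifs with hlt hm
    · have hmid : (lo + hi) / 2 < bounds.length := by omega
      rw [PySem.List.pyGetD_eq_getElem bounds 0 (by positivity)
        (by exact_mod_cast hmid)] at hm
      simp only [Int.toNat_natCast] at hm
      have := ih ((lo + hi) / 2 + 1) hi (by omega) (by omega) h2
        (fun i hilt h => le_trans (hmono i ((lo + hi) / 2) h hmid (by omega)) hm) hhi
      exact ⟨by omega, this.2.1, this.2.2.1, this.2.2.2⟩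
    · have hmid : (lo + hi) / 2 < bounds.length := by omega
      rw [PySem.List.pyGetD_eq_getElem bounds 0 (by positivity)
        (by exact_mod_cast hmid)] at hm
      simp only [Int.toNat_natCast] at hm
      replace hm : q < bounds[(lo + hi) / 2] := by omega
      have := ih lo ((lo + hi) / 2) (by omega) (by omega) (by omega) hlo
        (fun i hile h => lt_of_lt_of_le hm (hmono ((lo + hi) / 2) i hmid h hile))
      exact ⟨this.1, by omega, this.2.2.1, this.2.2.2⟩
    · exact ⟨le_refl lo, h1, fun i hilt h => hlo i hilt h,
        fun i hile h => hhi i (by omega) h⟩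

-- names for B's intermediate lists (definitionally the let-bound lists in make_names_py_alt)
def valsL (items : String) (sorted_arr : List Int) : List (Option Char) :=
  (PySem.List.slice sorted_arr none (some (PySem.Str.len items))).map
    (fun i => PySem.Str.pyGet? items i)

def boundsL (items : String) (sorted_arr : List Int) : List Int :=
  (PySem.List.pyRange 0 (PySem.Str.len items) 1).filter
    (fun p => p == 0 || !(PySem.List.pyGetD (valsL items sorted_arr) p none ==
      PySem.List.pyGetD (valsL items sorted_arr) (p - 1) none))

theorem valsL_eq (items : String) (sorted_arr : List Int) :
    valsL items sorted_arr
      = (sorted_arr.take items.toList.length).map (fun i => PySem.Str.pyGet? items i) := by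
  simp only [valsL, PySem.Str.len_eq, PySem.List.slice_to_natCast]

-- bridge: reading valsL at a valid position is valAt
theorem valsL_get (items : String) (sorted_arr : List Int)
    (hlen : items.toList.length ≤ sorted_arr.length)
    (x : Nat) (hx : x < items.toList.length) :
    PySem.List.pyGetD (valsL items sorted_arr) ((x : Nat) : Int) none
      = valAt items sorted_arr x := by
  have hxsa : x < sorted_arr.length := by omega
  rw [PySem.List.pyGetD_natCast, valsL_eq]
  have h1 : x < (sorted_arr.take items.toList.length).length := by
    rw [List.length_take]; omega
  rw [List.getD_eq_getElem _ none (by simpa using h1)]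
  rw [List.getElem_map, List.getElem_take]
  unfold valAt
  rw [PySem.List.pyGetD_eq_getElem _ 0 (by positivity) (by exact_mod_cast hxsa)]
  simp

-- bridge: B's filter predicate is the run-start property of nmN/valAt
theorem pred_bridge (items : String) (sorted_arr : List Int)
    (hlen : items.toList.length ≤ sorted_arr.length)
    (x : Int) (h0 : 0 ≤ x) (hx : x < (items.toList.length : Int)) :
    ((x == 0 || !(PySem.List.pyGetD (valsL items sorted_arr) x none ==
        PySem.List.pyGetD (valsL items sorted_arr) (x - 1) none)) = true)
      ↔ (x.toNat = 0 ∨ valAt items sorted_arr x.toNat ≠ valAt items sorted_arr (x.toNat - 1)) := by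
  lift x to Nat using h0
  by_cases hz : x = 0
  · subst hz; simp
  · have hx' : x < items.toList.length := by exact_mod_cast hx
    have hcast : ((x : Int) - 1) = (((x - 1 : Nat) : Nat) : Int) := by omega
    rw [hcast, valsL_get items sorted_arr hlen x hx',
      valsL_get items sorted_arr hlen (x - 1) (by omega)]
    simp [hz, beq_iff_eq]

theorem boundsL_mem (items : String) (sorted_arr : List Int)
    (hlen : items.toList.length ≤ sorted_arr.length) (x : Int) :
    x ∈ boundsL items sorted_arr
      ↔ (0 ≤ x ∧ x < (items.toList.length : Int) ∧
          (x.toNat = 0 ∨ valAt items sorted_arr x.toNat ≠ valAt items sorted_arr (x.toNat - 1))) := by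
  unfold boundsL
  rw [List.mem_filter, PySem.Str.len_eq, PySem.List.mem_pyRange_one]
  constructor
  · rintro ⟨⟨h0, hx⟩, hp⟩
    exact ⟨h0, hx, (pred_bridge items sorted_arr hlen x h0 hx).1 hp⟩
  · rintro ⟨h0, hx, hp⟩
    exact ⟨⟨h0, hx⟩, (pred_bridge items sorted_arr hlen x h0 hx).2 hp⟩

theorem boundsL_mono (items : String) (sorted_arr : List Int)
    (i j : Nat) (hi : i < (boundsL items sorted_arr).length)
    (hj : j < (boundsL items sorted_arr).length) (hij : i ≤ j) :
    (boundsL items sorted_arr)[i] ≤ (boundsL items sorted_arr)[j] := by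
  have hpw : (boundsL items sorted_arr).Pairwise (· < ·) :=
    List.Pairwise.filter _ (PySem.List.pairwise_lt_pyRange_one 0 (PySem.Str.len items))
  rcases Nat.eq_or_lt_of_le hij with rfl | hlt
  · exact le_refl _
  · exact le_of_lt (List.pairwise_iff_getElem.1 hpw i j hi hj hlt)

-- the value B writes at sorted position q is exactly A's name nmN q
theorem B_name (items : String) (sorted_arr : List Int)
    (hlen : items.toList.length ≤ sorted_arr.length)
    (q : Int) (h0 : 0 ≤ q) (hq : q < (items.toList.length : Int)) :
    PySem.List.pyGetD (boundsL items sorted_arr)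
        ((bsr (boundsL items sorted_arr) q (boundsL items sorted_arr).length 0 (boundsL items sorted_arr).length - 1 : Nat) : Int) 0
      = ((nmN items sorted_arr q.toNat : Nat) : Int) := by
  have hmono := boundsL_mono items sorted_arr
  obtain ⟨hr0, hrlen, hle, hgt⟩ := bsr_inv (boundsL items sorted_arr) q hmono
    (boundsL items sorted_arr).length 0 (boundsL items sorted_arr).length
    (by omega) (Nat.zero_le _) (le_refl _)
    (by omega) (fun i hile h => absurd h (by omega))
  set bounds := boundsL items sorted_arr with hbdef
  set r := bsr bounds q bounds.length 0 bounds.length with hrdef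
  -- 0 is a boundary, so bounds is nonempty and its head is ≤ q
  have h0mem : (0 : Int) ∈ bounds := by
    rw [hbdef, boundsL_mem items sorted_arr hlen]
    exact ⟨le_refl 0, by omega, Or.inl rfl⟩
  obtain ⟨i0, hi0, hi0v⟩ := List.mem_iff_getElem.1 h0mem
  have hb0 : bounds[0]'(by omega) ≤ q := by
    have := hmono 0 i0 (by omega) hi0 (Nat.zero_le _)
    omega
  have hr1 : 1 ≤ r := by
    by_contra hc
    have := hgt 0 (by omega) (by omega)
    omega
  -- bounds[r-1] is the greatest boundary ≤ q, and nmN q.toNat is a boundary ≤ q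
  have hmem : ((nmN items sorted_arr q.toNat : Nat) : Int) ∈ bounds := by
    rw [hbdef, boundsL_mem items sorted_arr hlen]
    have h1 := nmN_le items sorted_arr q.toNat
    refine ⟨by positivity, by omega, ?_⟩
    simpa using nmN_pred items sorted_arr q.toNat
  obtain ⟨j, hjlen, hjv⟩ := List.mem_iff_getElem.1 hmem
  have hnmle : ((nmN items sorted_arr q.toNat : Nat) : Int) ≤ q := by
    have := nmN_le items sorted_arr q.toNat
    omega
  have hjr : j < r := by
    by_contra hc
    have := hgt j (by omega) hjlen
    omega
  have hglb : bounds[r - 1]'(by omega) ≤ q := hle (r - 1) (by omega) (by omega)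
  -- bounds[r-1] itself is a boundary position, hence ≤ nmN q.toNat
  have hbr_mem : bounds[r - 1]'(by omega) ∈ bounds := List.getElem_mem _
  have hbr_prop := (boundsL_mem items sorted_arr hlen (bounds[r - 1]'(by omega))).1 hbr_mem
  obtain ⟨hbr0, hbrn, hbrp⟩ := hbr_prop
  have hup : bounds[r - 1]'(by omega) ≤ ((nmN items sorted_arr q.toNat : Nat) : Int) := by
    have := nmN_max items sorted_arr q.toNat (bounds[r - 1]'(by omega)).toNat
      (by omega) hbrp
    omega
  have hdown : ((nmN items sorted_arr q.toNat : Nat) : Int) ≤ bounds[r - 1]'(by omega) := by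
    rw [← hjv]
    exact hmono j (r - 1) hjlen (by omega) (by omega)
  rw [PySem.List.pyGetD_eq_getElem _ 0 (by positivity) (by exact_mod_cast (by omega : r - 1 < bounds.length))]
  simp only [Int.toNat_natCast]
  omega

-- ===== VERDICT (by name: the statement is the Claim_ definition above) =====
theorem make_names_py_spec : Claim_equal_make_names_py := by
  intro items sorted_arr _ hpre
  obtain ⟨hlen, hmem⟩ := hpre
  unfold Spec_make_names_py
  have hB : make_names_py_alt items sorted_arr
      = (PySem.List.pyRange 0 (items.toList.length : Int) 1).foldl
          (fun r p => PySem.List.pySetD r (PySem.List.pyGetD sorted_arr p 0)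
            (PySem.List.pyGetD (boundsL items sorted_arr)
              ((bsr (boundsL items sorted_arr) p (boundsL items sorted_arr).length 0 (boundsL items sorted_arr).length - 1 : Nat) : Int) 0))
          (List.replicate items.toList.length (-1 : Int)) := by
    simp only [make_names_py_alt, boundsL, valsL, PySem.Str.len_eq, Int.toNat_natCast]
  have hA : make_names_py items sorted_arr
      = ((PySem.List.pyRange 0 (items.toList.length : Int) 1).foldl (aStep items sorted_arr)
          (List.replicate items.toList.length (-1 : Int), (-1 : Int), (none : Option Char))).1 := by
    simp only [make_names_py, PySem.Str.len_eq]
  rw [hA, hB]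
  rw [PySem.List.foldl_congr_mem _ _
    (fun r q => PySem.List.pySetD r (PySem.List.pyGetD sorted_arr q 0)
      ((nmN items sorted_arr q.toNat : Nat) : Int)) _
    (fun acc x hx => by
      obtain ⟨hx0, hxn⟩ := PySem.List.mem_pyRange_one.1 hx
      rw [B_name items sorted_arr hlen x hx0 hxn])]
  by_cases hn : items.toList.length = 0
  · rw [PySem.List.pyRange_one_eq_nil (by simp [hn])]
    simp
  · have hn0 : (0 : Int) < (items.toList.length : Int) := by exact_mod_cast Nat.pos_of_ne_zero hn
    rw [PySem.List.pyRange_one_cons hn0]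
    simp only [List.foldl_cons]
    have hval0 : PySem.Str.pyGet? items (PySem.List.pyGetD sorted_arr (0 : Int) 0)
        = valAt items sorted_arr 0 := rfl
    have hne : valAt items sorted_arr 0 ≠ none := by
      have hsa : 0 < sorted_arr.length := by omega
      have hget : PySem.List.pyGetD sorted_arr ((0 : Nat) : Int) 0 = sorted_arr[0] := by
        rw [PySem.List.pyGetD_natCast]
        exact List.getD_eq_getElem sorted_arr 0 hsa
      have hin : PySem.Raise.InRange items.toList.length sorted_arr[0] := by
        refine hmem sorted_arr[0] ?_
        rw [List.mem_take_iff_getElem]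
        exact ⟨0, by omega, rfl⟩
      unfold valAt
      rw [hget]
      exact key_ne_none items sorted_arr[0] hin
    have hstep : aStep items sorted_arr
        (List.replicate items.toList.length (-1 : Int), (-1 : Int), (none : Option Char)) 0
        = (PySem.List.pySetD (List.replicate items.toList.length (-1 : Int))
            (PySem.List.pyGetD sorted_arr (0 : Int) 0) 0, (0 : Int), valAt items sorted_arr 0) := by
      simp only [aStep]
      rw [hval0, if_pos hne, if_pos hne]
    rw [hstep]
    have hone : ((0 : Int) + 1) = ((1 : Nat) : Int) := by norm_num
    rw [hone]
    have := A_scatter items sorted_arr items.toList.length 1 (le_refl 1)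
      (PySem.List.pySetD (List.replicate items.toList.length (-1 : Int))
        (PySem.List.pyGetD sorted_arr (0 : Int) 0) 0)
    simp only [Nat.sub_self, nmN, Nat.cast_zero] at this
    rw [this]
    norm_num [nmN]
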